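-- pv_equiv track=rewrite | github.com/Alpenl/soma-gpu | moshpp/chmosh_torch.py | _sequence_chunk_ranges
-- ===== SOURCE A (Python) =====
-- def _sequence_chunk_ranges(total_frames, chunk_size, overlap):
--     if total_frames <= 0:
--         return []
--     chunk_size = max(int(chunk_size), 1)
--     overlap = max(int(overlap), 0)
--     step = max(chunk_size - overlap, 1)
--     ranges = []
--     start = 0
--     while start < total_frames:
--         end = min(start + chunk_size, total_frames)
--         ranges.append((start, end))
--         if end >= total_frames:
--             break
--         start += step
--     return ranges
-- ===== SOURCE B (Python) =====
-- def _sequence_chunk_ranges(total_frames, chunk_size, overlap):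
--     if total_frames <= 0:
--         return []
--     c = max(int(chunk_size), 1)
--     o = max(int(overlap), 0)
--     s = max(c - o, 1)
--     # number of chunks in closed form: last chunk is the first one reaching total_frames,
--     # i.e. the first i with i*s + c >= total_frames
--     num = 1 + max(0, -(-(total_frames - c) // s))
--     return [(i * s, min(i * s + c, total_frames)) for i in range(num)]
-- ===== Notes on version B (the rewrite author's own statement) =====
-- stated objective: alternative
-- what changed: Replaces the generate-and-test while loop with an early break by a closed-form ceiling-division count of chunks followed by a direct list-comprehension materialization.
import Mathlib
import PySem

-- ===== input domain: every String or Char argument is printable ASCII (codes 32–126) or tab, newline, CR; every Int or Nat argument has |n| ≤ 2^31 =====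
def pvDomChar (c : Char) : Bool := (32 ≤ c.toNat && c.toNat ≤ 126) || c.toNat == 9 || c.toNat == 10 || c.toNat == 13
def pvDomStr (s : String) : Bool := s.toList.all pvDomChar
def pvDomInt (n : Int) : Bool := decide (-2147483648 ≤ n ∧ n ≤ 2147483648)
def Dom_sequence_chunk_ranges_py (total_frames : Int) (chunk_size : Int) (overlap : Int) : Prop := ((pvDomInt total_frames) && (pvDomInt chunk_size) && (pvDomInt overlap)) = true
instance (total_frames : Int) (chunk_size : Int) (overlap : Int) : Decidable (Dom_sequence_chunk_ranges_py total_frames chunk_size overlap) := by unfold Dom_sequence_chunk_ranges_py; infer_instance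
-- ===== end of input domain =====

-- B replaces A's generate-and-test while loop by a closed-form chunk count plus direct materialization (alternative decomposition, same cost).


-- ===== PORT A =====
-- while-loop of A as structural recursion on (total_frames - start), decreasing because step ≥ 1
def seqChunkLoopA (total_frames chunk_size step start : Int) (hstep : 1 ≤ step) :
    List (Int × Int) :=
  if _h : start < total_frames then
    let e := min (start + chunk_size) total_frames
    if e ≥ total_frames then [(start, e)]
    else (start, e) :: seqChunkLoopA total_frames chunk_size step (start + step) hstep
  else []
termination_by (total_frames - start).toNat
decreasing_by
  have : 0 < total_frames - start := by omega
  omega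

def sequence_chunk_ranges_py (total_frames : Int) (chunk_size : Int) (overlap : Int) : List (Int × Int) :=
  if total_frames ≤ 0 then []
  else
    let chunk_size' := max chunk_size 1
    let overlap' := max overlap 0
    let step := max (chunk_size' - overlap') 1
    seqChunkLoopA total_frames chunk_size' step 0 (le_max_right _ _)

-- ===== PORT B =====
def sequence_chunk_ranges_py_alt (total_frames : Int) (chunk_size : Int) (overlap : Int) : List (Int × Int) :=
  if total_frames ≤ 0 then []
  else
    let c := max chunk_size 1
    let o := max overlap 0
    let s := max (c - o) 1
    let num := 1 + max 0 (-(PySem.Int.floordiv (-(total_frames - c)) s))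
    (PySem.List.pyRange 0 num 1).map (fun i => (i * s, min (i * s + c) total_frames))

-- ===== PRECONDITION & SPEC =====
def Spec_sequence_chunk_ranges_py (total_frames : Int) (chunk_size : Int) (overlap : Int) (out : List (Int × Int)) : Prop := out = sequence_chunk_ranges_py_alt total_frames chunk_size overlap
instance (total_frames : Int) (chunk_size : Int) (overlap : Int) (out : List (Int × Int)) : Decidable (Spec_sequence_chunk_ranges_py total_frames chunk_size overlap out) := by unfold Spec_sequence_chunk_ranges_py; infer_instance

-- ===== CLAIM (what is proved, stated in full; the proofs are below) =====
def Claim_equal_sequence_chunk_ranges_py : Prop := ∀ (total_frames : Int) (chunk_size : Int) (overlap : Int), Dom_sequence_chunk_ranges_py total_frames chunk_size overlap → Spec_sequence_chunk_ranges_py total_frames chunk_size overlap (sequence_chunk_ranges_py total_frames chunk_size overlap)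

-- ===== LEMMAS AND PROOFS =====

-- Break case of the A-loop: at the closed-form last index M = max 0 ⌈(t-c)/s⌉
-- the chunk reaches total_frames and the loop emits exactly one final range.
theorem seqChunkLoopA_last (t c s k : Int) (hs : 1 ≤ s) (hsc : s ≤ c) (ht : 0 < t)
    (hkM : k = max 0 (-(PySem.Int.floordiv (-(t - c)) s))) :
    seqChunkLoopA t c s (k * s) hs = [(k * s, min (k * s + c) t)] := by
  set q := -(PySem.Int.floordiv (-(t - c)) s) with hq
  have hqb : (q - 1) * s < t - c ∧ t - c ≤ q * s :=
    (PySem.Int.neg_floordiv_neg_eq_iff_of_pos (by omega)).mp rfl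
  have hlt : k * s < t := by
    rcases le_or_gt q 0 with hq0 | hq0
    · have hk0 : k = 0 := by omega
      simpa [hk0] using ht
    · have hk' : k = q := by omega
      subst hk'
      nlinarith [hqb.1, hqb.2]
  have hend : t ≤ k * s + c := by
    rcases le_or_gt q 0 with hq0 | hq0
    · have hk0 : k = 0 := by omega
      have h1 : t - c ≤ q * s := hqb.2
      have h2 : q * s ≤ 0 := by nlinarith
      simp only [hk0, zero_mul, zero_add]; omega
    · have hk' : k = q := by omega
      subst hk'; have := hqb.2; omega
  rw [seqChunkLoopA]
  simp only [dif_pos hlt]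
  rw [if_pos (by simp [min_def]; omega)]

-- Main invariant: starting the A-loop at start = k*s, for k between 0 and the
-- closed-form last index M, yields exactly B's chunks k..M.
theorem seqChunkLoopA_eq_map (n : Nat) : ∀ (t c s k : Int) (hs : 1 ≤ s), s ≤ c → 0 < t →
    0 ≤ k → k ≤ max 0 (-(PySem.Int.floordiv (-(t - c)) s)) →
    (max 0 (-(PySem.Int.floordiv (-(t - c)) s)) - k).toNat ≤ n →
    seqChunkLoopA t c s (k * s) hs =
      (PySem.List.pyRange k (1 + max 0 (-(PySem.Int.floordiv (-(t - c)) s))) 1).map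
        (fun i => (i * s, min (i * s + c) t)) := by
  induction n with
  | zero =>
    intro t c s k hs hsc ht hk hkM hn
    have hkM' : k = max 0 (-(PySem.Int.floordiv (-(t - c)) s)) := by omega
    rw [seqChunkLoopA_last t c s k hs hsc ht hkM']
    have hr : PySem.List.pyRange k (1 + max 0 (-(PySem.Int.floordiv (-(t - c)) s))) 1 = [k] := by
      have h1 : (1 : Int) + max 0 (-(PySem.Int.floordiv (-(t - c)) s)) = k + 1 := by omega
      rw [h1, PySem.List.pyRange_one_singleton]
    rw [hr]
    simp
  | succ m ih =>
    intro t c s k hs hsc ht hk hkM hn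
    set q := -(PySem.Int.floordiv (-(t - c)) s) with hq
    have hqb : (q - 1) * s < t - c ∧ t - c ≤ q * s :=
      (PySem.Int.neg_floordiv_neg_eq_iff_of_pos (by omega)).mp rfl
    rcases eq_or_lt_of_le hkM with hkM' | hkM'
    · -- k = M: the break fires
      rw [seqChunkLoopA_last t c s k hs hsc ht hkM']
      have hr : PySem.List.pyRange k (1 + max 0 q) 1 = [k] := by
        have h1 : (1 : Int) + max 0 q = k + 1 := by omega
        rw [h1, PySem.List.pyRange_one_singleton]
      rw [hr]
      simp
    · -- k < M, so M = q > 0 and k*s + c < t: loop continues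
      have hq0 : 0 < q := by omega
      have hkq : k + 1 ≤ q := by omega
      have hcont : k * s + c < t := by
        have h1 : k ≤ q - 1 := by omega
        have h2 : k * s ≤ (q - 1) * s := by nlinarith
        have := hqb.1
        omega
      have hlt : k * s < t := by omega
      rw [seqChunkLoopA]
      simp only [dif_pos hlt]
      rw [if_neg (by simp [min_def]; omega)]
      have hrec : seqChunkLoopA t c s (k * s + s) hs =
          (PySem.List.pyRange (k + 1) (1 + max 0 q) 1).map
            (fun i => (i * s, min (i * s + c) t)) := by
        have h1 : k * s + s = (k + 1) * s := by ring
        rw [h1]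
        exact ih t c s (k + 1) hs hsc ht (by omega) (by omega) (by omega)
      rw [hrec, PySem.List.pyRange_one_cons (show k < 1 + max 0 q by omega)]
      simp

-- ===== VERDICT (by name: the statement is the Claim_ definition above) =====
theorem sequence_chunk_ranges_py_spec : Claim_equal_sequence_chunk_ranges_py := by
  intro t c o _
  unfold Spec_sequence_chunk_ranges_py sequence_chunk_ranges_py sequence_chunk_ranges_py_alt
  by_cases ht : t ≤ 0
  · simp [ht]
  · simp only [if_neg ht]
    have h := seqChunkLoopA_eq_map
      (max 0 (-(PySem.Int.floordiv (-(t - max c 1)) (max (max c 1 - max o 0) 1)))).toNat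
      t (max c 1) (max (max c 1 - max o 0) 1) 0 (le_max_right _ _)
      (by omega) (by omega) le_rfl (by omega) (by omega)
    simpa using h
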